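-- pv_equiv track=rewrite | github.com/hroncok/tox-config-reader | src/tox_config_reader/substitutions.py | _parse_substitution
-- ===== SOURCE A (Python) =====
-- def _parse_substitution(expr: str) -> tuple[str, list[str]]:
--     """
--     Parse a substitution expression into type and arguments.
--
--     Args:
--         expr: The expression inside braces (e.g., "env:KEY:DEFAULT").
--
--     Returns:
--         Tuple of (substitution_type, arguments).
--     """
--     # Handle special single-character substitutions
--     if expr == ":":
--         return ("pathsep", [])
--     if expr == "/":
--         return ("sep", [])
--
--     # Split on colons, but handle escaped colons, nested braces, and brackets
--     parts = []
--     current = []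
--     i = 0
--     brace_depth = 0
--     bracket_depth = 0
--
--     while i < len(expr):
--         char = expr[i]
--
--         # Handle escape sequences
--         if char == "\\" and i + 1 < len(expr):
--             next_char = expr[i + 1]
--             if next_char == ":":
--                 current.append(":")
--                 i += 2
--                 continue
--             elif next_char in "{}[]":
--                 current.append(next_char)
--                 i += 2
--                 continue
--
--         # Track brace and bracket depth
--         if char == "{":
--             brace_depth += 1
--             current.append(char)
--             i += 1
--         elif char == "}":
--             brace_depth -= 1
--             current.append(char)
--             i += 1
--         elif char == "[":
--             bracket_depth += 1
--             current.append(char)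
--             i += 1
--         elif char == "]":
--             bracket_depth -= 1
--             current.append(char)
--             i += 1
--         elif char == ":" and brace_depth == 0 and bracket_depth == 0:
--             # Only split on colon if not inside nested braces or brackets
--             parts.append("".join(current))
--             current = []
--             i += 1
--         else:
--             current.append(char)
--             i += 1
--
--     parts.append("".join(current))
--
--     if not parts:
--         return ("unknown", [])
--
--     return (parts[0], parts[1:])
-- ===== SOURCE B (Python) =====
-- def _parse_substitution(expr: str) -> tuple[str, list[str]]:
--     if expr == ":":
--         return ("pathsep", [])
--     if expr == "/":
--         return ("sep", [])
--     # pass 1: flatten into a token stream: literal chars, None = separator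
--     toks = []
--     i = 0
--     bd = 0
--     kd = 0
--     n = len(expr)
--     while i < n:
--         c = expr[i]
--         if c == "\\" and i + 1 < n and expr[i + 1] in ":{}[]":
--             toks.append(expr[i + 1])
--             i += 2
--             continue
--         if c == ":" and bd == 0 and kd == 0:
--             toks.append(None)
--             i += 1
--             continue
--         bd += (c == "{") - (c == "}")
--         kd += (c == "[") - (c == "]")
--         toks.append(c)
--         i += 1
--     # pass 2: split the token stream on the separator markers
--     parts = []
--     cur = []
--     for t in toks:
--         if t is None:
--             parts.append("".join(cur))
--             cur = []
--         else:
--             cur.append(t)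
--     parts.append("".join(cur))
--     return (parts[0], parts[1:])
-- ===== Notes on version B (the rewrite author's own statement) =====
-- stated objective: alternative
-- what changed: A's single fused loop that simultaneously unescapes and splits into parts/current accumulators is replaced by two passes: first flatten the expression into a token stream of literal characters and separator markers (escapes resolved, depths tracked), then split that stream on the markers.
import Mathlib
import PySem

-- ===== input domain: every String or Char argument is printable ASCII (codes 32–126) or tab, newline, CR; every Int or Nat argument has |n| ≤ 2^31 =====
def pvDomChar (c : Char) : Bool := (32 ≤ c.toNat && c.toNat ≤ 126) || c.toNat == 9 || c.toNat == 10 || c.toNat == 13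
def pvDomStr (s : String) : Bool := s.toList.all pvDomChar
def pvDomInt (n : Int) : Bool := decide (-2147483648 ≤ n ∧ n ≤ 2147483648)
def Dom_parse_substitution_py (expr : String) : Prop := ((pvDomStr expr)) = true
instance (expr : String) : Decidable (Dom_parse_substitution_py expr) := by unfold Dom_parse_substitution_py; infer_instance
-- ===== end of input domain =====

-- B replaces A's fused split-and-unescape loop by two passes: tokenize into a flat stream of
-- literal chars and separator markers, then split that stream (objective: alternative decomposition).

-- ===== PORT A =====
-- A's while loop: state (parts, current, brace_depth, bracket_depth); segments kept as List Char
-- ("".join is deferred to a final String.mk map, exact since current is a list of chars).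
def goA : List Char → List (List Char) → List Char → Int → Int → List (List Char)
  | [], parts, current, _, _ => parts ++ [current]
  | '\\' :: n :: rest2, parts, current, bd, kd =>
    -- char == "\\" and i + 1 < len(expr)
    if n = ':' then goA rest2 parts (current ++ [':']) bd kd
    else if n = '{' ∨ n = '}' ∨ n = '[' ∨ n = ']' then goA rest2 parts (current ++ [n]) bd kd
    else
      -- fall through: '\' is none of {}[]: so only the else branch applies
      goA (n :: rest2) parts (current ++ ['\\']) bd kd
  | c :: rest, parts, current, bd, kd =>
    if c = '{' then goA rest parts (current ++ [c]) (bd + 1) kd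
    else if c = '}' then goA rest parts (current ++ [c]) (bd - 1) kd
    else if c = '[' then goA rest parts (current ++ [c]) bd (kd + 1)
    else if c = ']' then goA rest parts (current ++ [c]) bd (kd - 1)
    else if c = ':' ∧ bd = 0 ∧ kd = 0 then goA rest (parts ++ [current]) [] bd kd
    else goA rest parts (current ++ [c]) bd kd
termination_by cs _ _ _ _ => cs.length

def parse_substitution_py (expr : String) : String × List String :=
  if expr = ":" then ("pathsep", [])
  else if expr = "/" then ("sep", [])
  else
    match (goA expr.toList [] [] 0 0).map String.mk with
    | [] => ("unknown", [])          -- unreachable guard, as in A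
    | p :: ps => (p, ps)

-- ===== PORT B =====
-- pass 1 of B: the while loop producing the flat token stream (some c = literal char, none = separator)
def tokenize : List Char → Int → Int → List (Option Char)
  | [], _, _ => []
  | '\\' :: n :: rest2, bd, kd =>
    if n = ':' ∨ n = '{' ∨ n = '}' ∨ n = '[' ∨ n = ']' then some n :: tokenize rest2 bd kd
    else some '\\' :: tokenize (n :: rest2) bd kd   -- '\\' itself contributes 0 to both deltas
  | c :: rest, bd, kd =>
    if c = ':' ∧ bd = 0 ∧ kd = 0 then none :: tokenize rest bd kd
    else tokenize rest
        (bd + (if c = '{' then 1 else 0) - (if c = '}' then 1 else 0))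
        (kd + (if c = '[' then 1 else 0) - (if c = ']' then 1 else 0)) |> (some c :: ·)
termination_by cs _ _ => cs.length

-- pass 2 of B: the for loop splitting the token stream on the markers
def splitToks : List (Option Char) → List (List Char) → List Char → List (List Char)
  | [], parts, cur => parts ++ [cur]
  | none :: ts, parts, cur => splitToks ts (parts ++ [cur]) []
  | some c :: ts, parts, cur => splitToks ts parts (cur ++ [c])

def parse_substitution_py_alt (expr : String) : String × List String :=
  if expr = ":" then ("pathsep", [])
  else if expr = "/" then ("sep", [])
  else
    match (splitToks (tokenize expr.toList 0 0) [] []).map String.mk with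
    | [] => ("unknown", [])
    | p :: ps => (p, ps)

-- ===== PRECONDITION & SPEC =====
def Spec_parse_substitution_py (expr : String) (out : String × List String) : Prop := out = parse_substitution_py_alt expr
instance (expr : String) (out : String × List String) : Decidable (Spec_parse_substitution_py expr out) := by unfold Spec_parse_substitution_py; infer_instance

-- ===== CLAIM (what is proved, stated in full; the proofs are below) =====
def Claim_equal_parse_substitution_py : Prop := ∀ (expr : String), Dom_parse_substitution_py expr → Spec_parse_substitution_py expr (parse_substitution_py expr)

-- ===== LEMMAS AND PROOFS =====

theorem goA_eq_alt (cs : List Char) (parts : List (List Char)) (current : List Char)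
    (bd kd : Int) : goA cs parts current bd kd = splitToks (tokenize cs bd kd) parts current := by
  fun_induction goA cs parts current bd kd with
  | case1 => simp [tokenize, splitToks]
  | case2 rest2 parts current bd kd ih =>
      rw [ih]; simp [tokenize, splitToks]
  | case3 n rest2 parts current bd kd h1 h2 ih =>
      rw [ih]
      have hc : n = ':' ∨ n = '{' ∨ n = '}' ∨ n = '[' ∨ n = ']' := by tauto
      simp [tokenize, hc, splitToks]
  | case4 n rest2 parts current bd kd h1 h2 ih =>
      rw [ih]
      have hc : ¬(n = ':' ∨ n = '{' ∨ n = '}' ∨ n = '[' ∨ n = ']') := by tauto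
      simp [tokenize, hc, splitToks]
  | case5 rest parts current bd kd hpat ih =>
      rw [ih]; simp [tokenize, splitToks]
  | case6 rest parts current bd kd hpat h1 ih =>
      rw [ih]; simp [tokenize, splitToks]
  | case7 rest parts current bd kd hpat h1 h2 ih =>
      rw [ih]; simp [tokenize, splitToks]
  | case8 rest parts current bd kd hpat h1 h2 h3 ih =>
      rw [ih]; simp [tokenize, splitToks]
  | case9 c rest parts current bd kd hpat h1 h2 h3 h4 h ih =>
      obtain ⟨hc, hbd, hkd⟩ := h
      subst hc hbd hkd
      rw [ih]; simp [tokenize, splitToks]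
  | case10 c rest parts current bd kd hpat h1 h2 h3 h4 h5 ih =>
      rw [ih]
      have hc : ¬(c = ':' ∧ bd = 0 ∧ kd = 0) := by tauto
      have hu : tokenize (c :: rest) bd kd = some c :: tokenize rest bd kd := by
        rcases rest with _ | ⟨n, rest2⟩
        · simp [tokenize, hc, h1, h2, h3, h4]
        · have hcb : ¬ c = '\\' := fun h => hpat n rest2 h rfl
          simp [tokenize, hc, h1, h2, h3, h4]
      rw [hu]; simp [splitToks]

-- ===== VERDICT (by name: the statement is the Claim_ definition above) =====
theorem parse_substitution_py_spec : Claim_equal_parse_substitution_py := by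
  intro expr _
  unfold Spec_parse_substitution_py parse_substitution_py parse_substitution_py_alt
  rw [goA_eq_alt]
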